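-- pv_equiv track=rewrite | github.com/wangsun39/leetcode | allcode/3800-3899/3887numberOfEdgesAdded.py | numberOfEdgesAdded
-- ===== SOURCE A (Python) =====
-- from typing import List
--
-- def numberOfEdgesAdded(n: int, edges: List[List[int]]) -> int:
--     fa = list(range(n))
--     dist = [0] * n
--
--     def find(x: int) -> int:
--         if fa[x] != x:
--             px = fa[x]
--             root = find(px)
--             dist[x] ^= dist[px]
--             fa[x] = root
--         return fa[x]
--
--     def union(u: int, v: int, w: int) -> bool:
--         pu = find(u)
--         pv = find(v)
--         du = dist[u]
--         dv = dist[v]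
--         if pu == pv:
--             return (du ^ dv) == w
--
--         val = du ^ dv ^ w
--         fa[pu] = pv
--         dist[pu] = val
--         return True
--
--     cnt = 0
--     for u, v, w in edges:
--         if union(u, v, w):
--             cnt += 1
--     return cnt
-- ===== SOURCE B (Python) =====
-- from typing import List
--
-- def numberOfEdgesAdded(n: int, edges: List[List[int]]) -> int:
--     fa = list(range(n))
--     dist = [0] * n
--
--     def find(x: int) -> int:
--         # iterative find: walk to the root collecting the path, then
--         # compress in a second (root-to-leaf) pass with an XOR accumulator
--         path = []
--         y = x
--         while fa[y] != y:
--             path.append(y)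
--             y = fa[y]
--         root = y
--         if path:
--             acc = dist[root]
--             for z in reversed(path):
--                 acc ^= dist[z]
--                 dist[z] = acc
--                 fa[z] = root
--         return root
--
--     cnt = 0
--     for u, v, w in edges:
--         pu, pv = find(u), find(v)
--         d = dist[u] ^ dist[v]
--         if pu == pv:
--             cnt += (d == w)
--         else:
--             fa[pu] = pv
--             dist[pu] = d ^ w
--             cnt += 1
--     return cnt
-- ===== Notes on version B (the rewrite author's own statement) =====
-- stated objective: alternative
-- what changed: The recursive find with path compression is replaced by an iterative two-pass find (walk to the root collecting the path, then compress it root-to-leaf with an XOR accumulator), and the union helper is inlined into the edge loop with boolean-arithmetic counting.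
import Mathlib
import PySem

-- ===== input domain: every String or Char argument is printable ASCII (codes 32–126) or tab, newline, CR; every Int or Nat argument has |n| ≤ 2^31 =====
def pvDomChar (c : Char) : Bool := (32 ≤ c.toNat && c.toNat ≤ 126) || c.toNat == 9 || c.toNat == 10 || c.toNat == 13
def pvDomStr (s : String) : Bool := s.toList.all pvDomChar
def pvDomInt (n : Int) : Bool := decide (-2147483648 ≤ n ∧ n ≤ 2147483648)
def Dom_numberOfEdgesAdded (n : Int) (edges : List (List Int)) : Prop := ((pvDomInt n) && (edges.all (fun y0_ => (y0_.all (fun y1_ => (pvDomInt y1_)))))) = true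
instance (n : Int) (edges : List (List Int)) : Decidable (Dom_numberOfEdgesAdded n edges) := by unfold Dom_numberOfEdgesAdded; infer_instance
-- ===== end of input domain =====

-- B replaces A's recursive `find` by an iterative two-pass walk-then-compress and inlines
-- `union` into the edge loop with boolean-arithmetic counting (objective: alternative
-- decomposition, same cost; the proof shows identical return values).

-- ===== PORT A =====
-- A's recursive find(x): returns (root, fa, dist) after path compression.
-- fuel bounds the recursion depth; it is n.toNat + 2 at every call, which the
-- forest shape reached from A's driver never exhausts (on non-terminating junk
-- states both ports run out of fuel at the same step, so equivalence is total).
def pvFindA : Nat → List Int → List Int → Int → Option (Int × List Int × List Int)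
  | 0, _, _, _ => none
  | fuel+1, fa, dist, x =>
    match PySem.List.pyGet? fa x with
    | none => none
    | some fx =>
      if fx = x then some (fx, fa, dist)
      else
        match pvFindA fuel fa dist fx with
        | none => none
        | some (root, fa1, dist1) =>
          match PySem.List.pyGet? dist1 x, PySem.List.pyGet? dist1 fx with
          | some dx, some dpx =>
            match PySem.List.pySet? dist1 x (PySem.Int.bxor dx dpx) with
            | none => none
            | some dist2 =>
              match PySem.List.pySet? fa1 x root with
              | none => none
              | some fa2 =>
                match PySem.List.pyGet? fa2 x with
                | none => none
                | some r => some (r, fa2, dist2)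
          | _, _ => none

-- A's union(u, v, w): returns (bool, fa, dist)
def pvUnionA (fuel : Nat) (fa dist : List Int) (u v w : Int) : Option (Bool × List Int × List Int) :=
  match pvFindA fuel fa dist u with
  | none => none
  | some (pu, fa1, dist1) =>
    match pvFindA fuel fa1 dist1 v with
    | none => none
    | some (pv, fa2, dist2) =>
      match PySem.List.pyGet? dist2 u, PySem.List.pyGet? dist2 v with
      | some du, some dv =>
        if pu = pv then some (decide (PySem.Int.bxor du dv = w), fa2, dist2)
        else
          match PySem.List.pySet? fa2 pu pv with
          | none => none
          | some fa3 =>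
            match PySem.List.pySet? dist2 pu (PySem.Int.bxor (PySem.Int.bxor du dv) w) with
            | none => none
            | some dist3 => some (true, fa3, dist3)
      | _, _ => none

-- A's driver loop over edges
def pvLoopA (fuel : Nat) : List (List Int) → Int → List Int → List Int → Option Int
  | [], cnt, _, _ => some cnt
  | e :: rest, cnt, fa, dist =>
    match e with
    | [u, v, w] =>
      match pvUnionA fuel fa dist u v w with
      | none => none
      | some (b, fa', dist') => pvLoopA fuel rest (if b then cnt + 1 else cnt) fa' dist'
    | _ => none

def numberOfEdgesAdded (n : Int) (edges : List (List Int)) : Int :=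
  (pvLoopA (n.toNat + 2) edges 0 (PySem.List.pyRange 0 n 1) (List.replicate n.toNat 0)).getD 0

-- ===== PORT B =====
-- B's find, phase 1: walk to the root collecting the path
def pvWalkB : Nat → List Int → Int → Option (List Int × Int)
  | 0, _, _ => none
  | fuel+1, fa, y =>
    match PySem.List.pyGet? fa y with
    | none => none
    | some fy =>
      if fy = y then some ([], y)
      else
        match pvWalkB fuel fa fy with
        | none => none
        | some (p, r) => some (y :: p, r)

-- B's find, phase 2: `for z in reversed(path): acc ^= dist[z]; dist[z] = acc; fa[z] = root`
-- (zs is the already-reversed path)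
def pvCompB (root : Int) : Int → List Int → List Int → List Int → Option (List Int × List Int × Int)
  | acc, [], fa, dist => some (fa, dist, acc)
  | acc, z :: zs, fa, dist =>
    match PySem.List.pyGet? dist z with
    | none => none
    | some dz =>
      match PySem.List.pySet? dist z (PySem.Int.bxor acc dz), PySem.List.pySet? fa z root with
      | some dist', some fa' => pvCompB root (PySem.Int.bxor acc dz) zs fa' dist'
      | _, _ => none

def pvFindB (fuel : Nat) (fa dist : List Int) (x : Int) : Option (Int × List Int × List Int) :=
  match pvWalkB fuel fa x with
  | none => none
  | some (path, root) =>
    match path with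
    | [] => some (root, fa, dist)
    | _ :: _ =>
      match PySem.List.pyGet? dist root with
      | none => none
      | some a0 =>
        match pvCompB root a0 path.reverse fa dist with
        | none => none
        | some (fa1, dist1, _) => some (root, fa1, dist1)

-- B's edge loop with union inlined and boolean-arithmetic counting
def pvLoopB (fuel : Nat) : List (List Int) → Int → List Int → List Int → Option Int
  | [], cnt, _, _ => some cnt
  | e :: rest, cnt, fa, dist =>
    match e with
    | [u, v, w] =>
      match pvFindB fuel fa dist u with
      | none => none
      | some (pu, fa1, dist1) =>
        match pvFindB fuel fa1 dist1 v with
        | none => none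
        | some (pv, fa2, dist2) =>
          match PySem.List.pyGet? dist2 u, PySem.List.pyGet? dist2 v with
          | some du, some dv =>
            let d := PySem.Int.bxor du dv
            if pu = pv then pvLoopB fuel rest (cnt + (if d = w then 1 else 0)) fa2 dist2
            else
              match PySem.List.pySet? fa2 pu pv, PySem.List.pySet? dist2 pu (PySem.Int.bxor d w) with
              | some fa3, some dist3 => pvLoopB fuel rest (cnt + 1) fa3 dist3
              | _, _ => none
          | _, _ => none
    | _ => none

def numberOfEdgesAdded_alt (n : Int) (edges : List (List Int)) : Int :=
  (pvLoopB (n.toNat + 2) edges 0 (PySem.List.pyRange 0 n 1) (List.replicate n.toNat 0)).getD 0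

-- ===== PRECONDITION & SPEC =====
-- Pre_ excludes exactly the inputs on which A raises: an edge that is not a
-- 3-element list (unpacking ValueError) or an endpoint outside [-n, n) (IndexError).
def pvOkEdge (n : Int) (e : List Int) : Bool :=
  match e with
  | [u, v, _] => decide (-n ≤ u ∧ u < n ∧ -n ≤ v ∧ v < n)
  | _ => false

def Pre_numberOfEdgesAdded (n : Int) (edges : List (List Int)) : Prop :=
  ∀ e ∈ edges, pvOkEdge n e = true
instance (n : Int) (edges : List (List Int)) : Decidable (Pre_numberOfEdgesAdded n edges) := by
  unfold Pre_numberOfEdgesAdded; infer_instance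

def pvWitness_numberOfEdgesAdded : Int × List (List Int) := (3, [[0, 1, 5], [1, 2, 3], [0, 2, 6]])

def Spec_numberOfEdgesAdded (n : Int) (edges : List (List Int)) (out : Int) : Prop := out = numberOfEdgesAdded_alt n edges
instance (n : Int) (edges : List (List Int)) (out : Int) : Decidable (Spec_numberOfEdgesAdded n edges out) := by unfold Spec_numberOfEdgesAdded; infer_instance

-- ===== CLAIM (what is proved, stated in full; the proofs are below) =====
def Claim_equal_numberOfEdgesAdded : Prop := ∀ (n : Int) (edges : List (List Int)), Dom_numberOfEdgesAdded n edges → Pre_numberOfEdgesAdded n edges → Spec_numberOfEdgesAdded n edges (numberOfEdgesAdded n edges)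

-- ===== LEMMAS AND PROOFS =====

theorem pv_inRange_of_get {α : Type} {xs : List α} {i : Int} {a : α}
    (h : PySem.List.pyGet? xs i = some a) : PySem.Raise.InRange xs.length i := by
  by_contra hc
  rw [← PySem.List.pyGet?_eq_none_iff] at hc
  simp [hc] at h

theorem pv_length_of_set {α : Type} {xs ys : List α} {i : Int} {v : α}
    (h : PySem.List.pySet? xs i v = some ys) : ys.length = xs.length := by
  unfold PySem.List.pySet? at h
  cases hk : PySem.List.pyIdx? xs.length i with
  | none => simp [hk] at h
  | some k => simp [hk] at h; subst h; simp

theorem pv_set_of_inRange {α : Type} (xs : List α) {i : Int}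
    (h : PySem.Raise.InRange xs.length i) (v : α) :
    ∃ ys, PySem.List.pySet? xs i v = some ys ∧ PySem.List.pyGet? ys i = some v ∧
      ys.length = xs.length := by
  obtain ⟨hlo, hhi⟩ := h
  have hk : ∃ k, PySem.List.pyIdx? xs.length i = some k ∧ k < xs.length := by
    unfold PySem.List.pyIdx?
    rcases lt_or_ge i 0 with hneg | hpos
    · rw [if_neg (by omega), if_pos hlo]
      exact ⟨_, rfl, by omega⟩
    · rw [if_pos hpos, if_pos hhi]
      exact ⟨_, rfl, by omega⟩
  obtain ⟨k, hk, hklt⟩ := hk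
  have hlen : (xs.set k v).length = xs.length := by simp
  refine ⟨xs.set k v, ?_, ?_, hlen⟩
  · simp [PySem.List.pySet?, hk]
  · unfold PySem.List.pyGet?
    rw [hlen, hk]
    simp [hklt]

theorem pvWalkB_nil {fuel : Nat} {fa : List Int} {y r : Int}
    (h : pvWalkB fuel fa y = some ([], r)) : r = y := by
  cases fuel with
  | zero => simp [pvWalkB] at h
  | succ fuel =>
    unfold pvWalkB at h
    cases hg : PySem.List.pyGet? fa y with
    | none => simp [hg] at h
    | some fy =>
      rw [hg] at h
      by_cases he : fy = y
      · simp [he] at h; exact h.symm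
      · simp only [if_neg he] at h
        cases hw : pvWalkB fuel fa fy with
        | none => simp [hw] at h
        | some pr => simp [hw] at h

theorem pvWalkB_head {fuel : Nat} {fa : List Int} {y q : Int} {p : List Int} {r : Int}
    (h : pvWalkB fuel fa y = some (q :: p, r)) : q = y := by
  cases fuel with
  | zero => simp [pvWalkB] at h
  | succ fuel =>
    unfold pvWalkB at h
    cases hg : PySem.List.pyGet? fa y with
    | none => simp [hg] at h
    | some fy =>
      rw [hg] at h
      by_cases he : fy = y
      · simp [he] at h
      · simp only [if_neg he] at h
        cases hw : pvWalkB fuel fa fy with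
        | none => simp [hw] at h
        | some pr => simp [hw] at h; exact h.1.1.symm

theorem pvCompB_append (root acc : Int) (l : List Int) (z : Int) (fa dist : List Int) :
    pvCompB root acc (l ++ [z]) fa dist =
      match pvCompB root acc l fa dist with
      | none => none
      | some (fa1, dist1, acc1) => pvCompB root acc1 [z] fa1 dist1 := by
  induction l generalizing acc fa dist with
  | nil => simp [pvCompB]
  | cons y l ih =>
    simp only [List.cons_append, pvCompB]
    cases hg : PySem.List.pyGet? dist y with
    | none => rfl
    | some dy =>
      dsimp only
      cases hs1 : PySem.List.pySet? dist y (PySem.Int.bxor acc dy) with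
      | none => rfl
      | some dist' =>
        cases hs2 : PySem.List.pySet? fa y root with
        | none => rfl
        | some fa' => exact ih _ _ _

theorem pvCompB_length {root acc : Int} {zs fa dist fa1 dist1 : List Int} {acc1 : Int}
    (h : pvCompB root acc zs fa dist = some (fa1, dist1, acc1)) :
    fa1.length = fa.length ∧ dist1.length = dist.length := by
  induction zs generalizing acc fa dist with
  | nil =>
    simp [pvCompB] at h
    obtain ⟨h1, h2, _⟩ := h
    subst h1; subst h2; exact ⟨rfl, rfl⟩
  | cons z zs ih =>
    unfold pvCompB at h
    cases hg : PySem.List.pyGet? dist z with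
    | none => simp [hg] at h
    | some dz =>
      rw [hg] at h
      dsimp only at h
      cases hs1 : PySem.List.pySet? dist z (PySem.Int.bxor acc dz) with
      | none => simp [hs1] at h
      | some dist' =>
        cases hs2 : PySem.List.pySet? fa z root with
        | none => simp [hs1, hs2] at h
        | some fa' =>
          rw [hs1, hs2] at h
          dsimp only at h
          obtain ⟨h1, h2⟩ := ih h
          exact ⟨h1.trans (pv_length_of_set hs2), h2.trans (pv_length_of_set hs1)⟩

theorem pvCompB_single {root acc : Int} {z : Int} {fa dist fa1 dist1 : List Int} {acc1 : Int}
    (h : pvCompB root acc [z] fa dist = some (fa1, dist1, acc1)) :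
    PySem.List.pyGet? dist1 z = some acc1 := by
  unfold pvCompB at h
  cases hg : PySem.List.pyGet? dist z with
  | none => simp [hg] at h
  | some dz =>
    rw [hg] at h
    dsimp only at h
    cases hs1 : PySem.List.pySet? dist z (PySem.Int.bxor acc dz) with
    | none => simp [hs1] at h
    | some dist' =>
      cases hs2 : PySem.List.pySet? fa z root with
      | none => simp [hs1, hs2] at h
      | some fa' =>
        rw [hs1, hs2] at h
        unfold pvCompB at h
        simp only [Option.some.injEq, Prod.mk.injEq] at h
        obtain ⟨_, h2, h3⟩ := h
        subst h2; subst h3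
        obtain ⟨ys, hset, hget, _⟩ :=
          pv_set_of_inRange dist (pv_inRange_of_get hg) (PySem.Int.bxor acc dz)
        rw [hs1] at hset
        cases hset
        exact hget

theorem pvFind_eq (fuel : Nat) : ∀ (fa dist : List Int) (x : Int),
    pvFindA fuel fa dist x = pvFindB fuel fa dist x := by
  induction fuel with
  | zero => intro fa dist x; rfl
  | succ fuel ih =>
    intro fa dist x
    rw [pvFindA]
    unfold pvFindB
    rw [pvWalkB]
    cases hg : PySem.List.pyGet? fa x with
    | none => rfl
    | some fx =>
      dsimp only
      by_cases he : fx = x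
      · subst he
        rw [if_pos rfl, if_pos rfl]
      · rw [if_neg he, if_neg he]
        cases hw : pvWalkB fuel fa fx with
        | none =>
          have hnone : pvFindA fuel fa dist fx = none := by
            rw [ih]; unfold pvFindB; rw [hw]
          rw [hnone]
        | some pr =>
          obtain ⟨p, r⟩ := pr
          dsimp only
          have hinner : pvFindA fuel fa dist fx = pvFindB fuel fa dist fx := ih _ _ _
          cases p with
          | nil =>
            -- fx is already a root: r = fx
            have hr : r = fx := pvWalkB_nil hw
            subst hr
            have hB : pvFindB fuel fa dist r = some (r, fa, dist) := by
              unfold pvFindB; rw [hw]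
            rw [hinner, hB]
            simp only [List.reverse_singleton]
            cases hr0 : PySem.List.pyGet? dist r with
            | none =>
              cases hdx : PySem.List.pyGet? dist x with
              | none => rfl
              | some dx => rfl
            | some a0 =>
              simp only [pvCompB]
              cases hdx : PySem.List.pyGet? dist x with
              | none => rfl
              | some dx =>
                dsimp only
                rw [PySem.Int.bxor_comm dx a0]
                obtain ⟨dist2, hsd, _, _⟩ :=
                  pv_set_of_inRange dist (pv_inRange_of_get hdx) (PySem.Int.bxor a0 dx)
                obtain ⟨fa2, hsf, hgf, _⟩ :=
                  pv_set_of_inRange fa (pv_inRange_of_get hg) r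
                simp [hsd, hsf, hgf]
          | cons q p' =>
            have hq : q = fx := pvWalkB_head hw
            subst hq
            have hB : pvFindB fuel fa dist q =
                match PySem.List.pyGet? dist r with
                | none => none
                | some a0 =>
                  match pvCompB r a0 (q :: p').reverse fa dist with
                  | none => none
                  | some (fa1, dist1, _) => some (r, fa1, dist1) := by
              unfold pvFindB; rw [hw]
            rw [hinner, hB]
            cases hr0 : PySem.List.pyGet? dist r with
            | none => rfl
            | some a0 =>
              dsimp only
              have hrev : (x :: q :: p').reverse = (q :: p').reverse ++ [x] := by
                simp
              rw [hrev, pvCompB_append]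
              cases hc : pvCompB r a0 (q :: p').reverse fa dist with
              | none => rfl
              | some t =>
                obtain ⟨fa1, dist1, acc1⟩ := t
                dsimp only
                -- the last processed node of the inner compression is fx,
                -- and its stored distance is the final accumulator acc1
                have hfx1 : PySem.List.pyGet? dist1 q = some acc1 := by
                  have hrev2 : (q :: p').reverse = p'.reverse ++ [q] := by simp
                  rw [hrev2, pvCompB_append] at hc
                  cases hc0 : pvCompB r a0 p'.reverse fa dist with
                  | none => rw [hc0] at hc; simp at hc
                  | some t0 =>
                    obtain ⟨fa0, dist0, acc0⟩ := t0
                    rw [hc0] at hc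
                    exact pvCompB_single hc
                have hlen := pvCompB_length hc
                simp only [pvCompB]
                cases hdx : PySem.List.pyGet? dist1 x with
                | none => rw [hfx1]
                | some dx =>
                  rw [hfx1]
                  dsimp only
                  rw [PySem.Int.bxor_comm dx acc1]
                  obtain ⟨dist2, hsd, _, _⟩ :=
                    pv_set_of_inRange dist1 (pv_inRange_of_get hdx) (PySem.Int.bxor acc1 dx)
                  have hinr : PySem.Raise.InRange fa1.length x := by
                    have := pv_inRange_of_get hg
                    rw [hlen.1]; exact this
                  obtain ⟨fa2, hsf, hgf, _⟩ := pv_set_of_inRange fa1 hinr r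
                  simp [hsd, hsf, hgf]

theorem pvLoop_eq (fuel : Nat) : ∀ (edges : List (List Int)) (cnt : Int) (fa dist : List Int),
    pvLoopA fuel edges cnt fa dist = pvLoopB fuel edges cnt fa dist := by
  intro edges
  induction edges with
  | nil => intro cnt fa dist; rfl
  | cons e rest ih =>
    intro cnt fa dist
    cases e with
    | nil => rfl
    | cons u e1 =>
      cases e1 with
      | nil => rfl
      | cons v e2 =>
        cases e2 with
        | nil => rfl
        | cons w e3 =>
          cases e3 with
          | cons _ _ => rfl
          | nil =>
            rw [pvLoopA, pvLoopB]
            dsimp only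
            unfold pvUnionA
            rw [pvFind_eq]
            cases h1 : pvFindB fuel fa dist u with
            | none => rfl
            | some t1 =>
              obtain ⟨pu, fa1, dist1⟩ := t1
              dsimp only
              rw [pvFind_eq]
              cases h2 : pvFindB fuel fa1 dist1 v with
              | none => rfl
              | some t2 =>
                obtain ⟨pv, fa2, dist2⟩ := t2
                dsimp only
                cases hdu : PySem.List.pyGet? dist2 u with
                | none =>
                  cases hdv : PySem.List.pyGet? dist2 v with
                  | none => rfl
                  | some dv => rfl
                | some du =>
                  cases hdv : PySem.List.pyGet? dist2 v with
                  | none => rfl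
                  | some dv =>
                    dsimp only
                    by_cases hpp : pu = pv
                    · rw [if_pos hpp, if_pos hpp]
                      dsimp only
                      rw [ih]
                      by_cases hxw : PySem.Int.bxor du dv = w
                      · simp [hxw]
                      · simp [hxw]
                    · rw [if_neg hpp, if_neg hpp]
                      cases hs1 : PySem.List.pySet? fa2 pu pv with
                      | none => rfl
                      | some fa3 =>
                        dsimp only
                        cases hs2 : PySem.List.pySet? dist2 pu
                            (PySem.Int.bxor (PySem.Int.bxor du dv) w) with
                        | none => rfl
                        | some dist3 =>
                          dsimp only
                          exact ih _ _ _

-- ===== VERDICT (by name: the statement is the Claim_ definition above) =====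
theorem numberOfEdgesAdded_spec : Claim_equal_numberOfEdgesAdded := by
  intro n edges _ _
  unfold Spec_numberOfEdgesAdded numberOfEdgesAdded numberOfEdgesAdded_alt
  rw [pvLoop_eq]
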